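-- pv_equiv track=rewrite | github.com/yacb2/lore | src/domaintome/graph/schema.py | _suggest_kebab
-- ===== SOURCE A (Python) =====
-- def _suggest_kebab(node_id: str) -> str:
--     """Best-effort fix for common id mistakes (dots, colons, spaces, _,
--     uppercase). Not a guarantee of validity — the caller still re-validates."""
--     out = []
--     last_was_sep = False
--     for ch in node_id.strip():
--         if ch.isalnum():
--             out.append(ch.lower())
--             last_was_sep = False
--         else:
--             if not last_was_sep and out:
--                 out.append("-")
--                 last_was_sep = True
--     return "".join(out).strip("-")
-- ===== SOURCE B (Python) =====
-- def _suggest_kebab(node_id: str) -> str: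
--     """Best-effort fix for common id mistakes (dots, colons, spaces, _,
--     uppercase). Not a guarantee of validity — the caller still re-validates."""
--     s = node_id.strip()
--     words = []
--     i, n = 0, len(s)
--     while i < n:
--         if s[i].isalnum():
--             j = i
--             while j < n and s[j].isalnum():
--                 j += 1
--             words.append("".join(c.lower() for c in s[i:j]))
--             i = j
--         else:
--             i += 1
--     return "-".join(words)
-- ===== Notes on version B (the rewrite author's own statement) =====
-- stated objective: alternative
-- what changed: B extracts the maximal alphanumeric runs as a list of lowercased words and joins them with single dashes, instead of streaming characters with a last_was_sep flag and stripping trailing dashes afterwards.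
import Mathlib
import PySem

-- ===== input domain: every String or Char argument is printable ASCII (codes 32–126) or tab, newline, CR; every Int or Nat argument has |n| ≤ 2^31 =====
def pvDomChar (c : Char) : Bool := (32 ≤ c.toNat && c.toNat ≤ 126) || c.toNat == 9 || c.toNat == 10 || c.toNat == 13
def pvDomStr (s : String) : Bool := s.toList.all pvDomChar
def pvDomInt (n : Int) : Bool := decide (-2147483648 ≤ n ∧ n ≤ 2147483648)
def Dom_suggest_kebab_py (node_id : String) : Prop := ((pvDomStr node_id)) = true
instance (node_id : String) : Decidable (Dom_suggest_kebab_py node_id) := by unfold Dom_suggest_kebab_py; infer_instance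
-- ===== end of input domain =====

-- B builds the list of maximal alphanumeric runs (lowercased) and joins them with dashes,
-- instead of A's streaming scan with a last_was_sep flag and a trailing strip('-').

-- ===== PORT A =====
def kebabStep (st : List Char × Bool) (ch : Char) : List Char × Bool :=
  if PySem.Chars.isalnum ch then (st.1 ++ [PySem.Chars.lowerChar ch], false)
  else if !st.2 && !st.1.isEmpty then (st.1 ++ ['-'], true) else st

def suggest_kebab_py (node_id : String) : String :=
  let st := (PySem.Str.strip node_id).toList.foldl kebabStep ([], false)
  PySem.Str.stripChars (String.ofList st.1) "-"

-- ===== PORT B =====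
-- the inner while-loop extracting one maximal alphanumeric run, then recursing past it
def kebabWords : List Char → List (List Char)
  | [] => []
  | c :: l =>
    if PySem.Chars.isalnum c then
      ((c :: l.takeWhile PySem.Chars.isalnum).map PySem.Chars.lowerChar)
        :: kebabWords (l.dropWhile PySem.Chars.isalnum)
    else kebabWords l
termination_by l => l.length
decreasing_by
  · exact Nat.lt_succ_of_le (List.length_dropWhile_le _ _)
  · simp

def suggest_kebab_py_alt (node_id : String) : String :=
  PySem.Str.join "-" ((kebabWords (PySem.Str.strip node_id).toList).map String.ofList)

-- ===== PRECONDITION & SPEC =====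
def Spec_suggest_kebab_py (node_id : String) (out : String) : Prop := out = suggest_kebab_py_alt node_id
instance (node_id : String) (out : String) : Decidable (Spec_suggest_kebab_py node_id out) := by unfold Spec_suggest_kebab_py; infer_instance

-- ===== CLAIM (what is proved, stated in full; the proofs are below) =====
def Claim_equal_suggest_kebab_py : Prop := ∀ (node_id : String), Dom_suggest_kebab_py node_id → Spec_suggest_kebab_py node_id (suggest_kebab_py node_id)

-- ===== LEMMAS AND PROOFS =====

-- the output suffix A's loop produces from a non-empty accumulator, and the final flag
def tailK : Bool → List Char → List Char
  | _, [] => []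
  | sep, c :: l =>
    if PySem.Chars.isalnum c then PySem.Chars.lowerChar c :: tailK false l
    else if sep then tailK true l else '-' :: tailK true l

def fsepK : Bool → List Char → Bool
  | sep, [] => sep
  | _, c :: l => if PySem.Chars.isalnum c then fsepK false l else fsepK true l

-- A's loop result from the empty start state
def runE : List Char → List Char
  | [] => []
  | c :: l => if PySem.Chars.isalnum c then PySem.Chars.lowerChar c :: tailK false l else runE l

def dropTrailDash (xs : List Char) : List Char :=
  (xs.reverse.dropWhile (fun c => c == '-')).reverse

-- the continuation of the joined-words string while inside a word
def wordsCont : List Char → List Char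
  | [] => []
  | c :: l =>
    if PySem.Chars.isalnum c then PySem.Chars.lowerChar c :: wordsCont l
    else if kebabWords l = [] then [] else '-' :: List.intercalate ['-'] (kebabWords l)

theorem charLe_toNat {a b : Char} (h : a ≤ b) : a.toNat ≤ b.toNat := by
  rw [Char.le_def] at h; exact h

theorem lower_ne_dash (c : Char) (h : PySem.Chars.isalnum c = true) :
    (PySem.Chars.lowerChar c == '-') = false := by
  simp only [PySem.Chars.isalnum, PySem.Chars.isalpha, PySem.Chars.isdigit,
    PySem.Chars.isupper, PySem.Chars.islower, Bool.or_eq_true, Bool.and_eq_true,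
    decide_eq_true_eq] at h
  simp only [PySem.Chars.lowerChar, PySem.Chars.isupper, Bool.and_eq_true, decide_eq_true_eq,
    beq_eq_false_iff_ne, ne_eq]
  split_ifs with hu
  · intro he
    have h1 : 65 ≤ c.toNat := charLe_toNat hu.1
    have h2 : c.toNat ≤ 90 := charLe_toNat hu.2
    have h3 := congrArg Char.toNat he
    rw [Char.toNat_ofNat] at h3
    have hv : (c.toNat + 32).isValidChar := by unfold Nat.isValidChar; left; omega
    rw [if_pos hv] at h3
    have h4 : ('-' : Char).toNat = 45 := by decide
    omega
  · intro he
    subst he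
    rcases h with (⟨h1, h2⟩ | ⟨h1, h2⟩) | ⟨h1, h2⟩
    · exact hu ⟨h1, h2⟩
    · have := charLe_toNat h1
      have h4 : ('a' : Char).toNat = 97 := by decide
      have h5 : ('-' : Char).toNat = 45 := by decide
      omega
    · have := charLe_toNat h1
      have h4 : ('0' : Char).toNat = 48 := by decide
      have h5 : ('-' : Char).toNat = 45 := by decide
      omega

theorem intercalate_cons' (s w : List Char) (ws : List (List Char)) :
    s.intercalate (w :: ws) = w ++ (if ws = [] then [] else s ++ s.intercalate ws) := by
  cases ws <;> simp [List.intercalate]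

theorem foldl_kebabStep_ne (l : List Char) : ∀ (acc : List Char) (sep : Bool), acc ≠ [] →
    l.foldl kebabStep (acc, sep) = (acc ++ tailK sep l, fsepK sep l) := by
  induction l with
  | nil => intro acc sep _; simp [tailK, fsepK]
  | cons c l ih =>
    intro acc sep h
    by_cases hc : PySem.Chars.isalnum c = true
    · simp only [List.foldl_cons, kebabStep, hc, if_pos]
      rw [ih (acc ++ [PySem.Chars.lowerChar c]) false (by simp)]
      simp [tailK, fsepK, hc]
    · have hne : acc.isEmpty = false := by simpa [List.isEmpty_iff] using h
      cases sep with
      | true =>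
        have hstep : kebabStep (acc, true) c = (acc, true) := by
          simp [kebabStep, hc]
        rw [List.foldl_cons, hstep, ih acc true h]
        simp [tailK, fsepK, hc]
      | false =>
        have hstep : kebabStep (acc, false) c = (acc ++ ['-'], true) := by
          simp [kebabStep, hc, hne]
        rw [List.foldl_cons, hstep, ih (acc ++ ['-']) true (by simp)]
        simp [tailK, fsepK, hc]

theorem foldl_kebabStep_empty (l : List Char) :
    (l.foldl kebabStep ([], false)).1 = runE l := by
  induction l with
  | nil => simp [runE]
  | cons c l ih =>
    by_cases hc : PySem.Chars.isalnum c = true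
    · have hstep : kebabStep ([], false) c = ([PySem.Chars.lowerChar c], false) := by
        simp [kebabStep, hc]
      rw [List.foldl_cons, hstep, foldl_kebabStep_ne l [PySem.Chars.lowerChar c] false (by simp)]
      simp [runE, hc]
    · have hstep : kebabStep ([], false) c = ([], false) := by
        simp [kebabStep, hc]
      rw [List.foldl_cons, hstep, ih]
      simp [runE, hc]

theorem kebabWords_shape (l : List Char) :
    kebabWords l = [] ∨ ∃ c t ws, kebabWords l = (c :: t) :: ws := by
  induction l using kebabWords.induct with
  | case1 => left; simp [kebabWords]
  | case2 c l hc _ =>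
    right
    rw [kebabWords, if_pos hc, List.map_cons]
    exact ⟨_, _, _, rfl⟩
  | case3 c l hc ih =>
    rw [kebabWords, if_neg hc]
    exact ih

theorem intercalate_kebabWords_eq_nil_iff (l : List Char) :
    (List.intercalate ['-'] (kebabWords l) = []) ↔ kebabWords l = [] := by
  rcases kebabWords_shape l with h | ⟨c, t, ws, h⟩
  · simp [h, List.intercalate]
  · rw [h, intercalate_cons']
    simp

theorem dropTrailDash_cons_ne (a : Char) (t : List Char) (h : (a == '-') = false) :
    dropTrailDash (a :: t) = a :: dropTrailDash t := by
  unfold dropTrailDash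
  rw [List.reverse_cons, List.dropWhile_append]
  by_cases he : (t.reverse.dropWhile (fun c => c == '-')).isEmpty = true
  · rw [if_pos he]
    rw [List.isEmpty_iff] at he
    simp [he, List.dropWhile, h]
  · rw [if_neg (by simpa using he)]
    simp

theorem dropTrailDash_cons_dash (t : List Char) :
    dropTrailDash ('-' :: t) =
      if dropTrailDash t = [] then [] else '-' :: dropTrailDash t := by
  unfold dropTrailDash
  rw [List.reverse_cons, List.dropWhile_append]
  by_cases he : (t.reverse.dropWhile (fun c => c == '-')).isEmpty = true
  · rw [if_pos he]
    rw [List.isEmpty_iff] at he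
    simp [he, List.dropWhile]
  · rw [if_neg (by simpa using he)]
    rw [List.isEmpty_iff] at he
    simp [he]

theorem wordsCont_eq (l : List Char) :
    wordsCont l = (l.takeWhile PySem.Chars.isalnum).map PySem.Chars.lowerChar ++
      (if kebabWords (l.dropWhile PySem.Chars.isalnum) = [] then []
       else '-' :: List.intercalate ['-'] (kebabWords (l.dropWhile PySem.Chars.isalnum))) := by
  induction l with
  | nil => simp [wordsCont, kebabWords]
  | cons c l ih =>
    by_cases hc : PySem.Chars.isalnum c = true
    · rw [wordsCont, if_pos hc, List.takeWhile_cons_of_pos hc, List.dropWhile_cons_of_pos hc]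
      simp only [List.map_cons, List.cons_append]
      rw [ih]
    · rw [wordsCont, if_neg hc, List.takeWhile_cons_of_neg hc, List.dropWhile_cons_of_neg hc]
      rw [kebabWords, if_neg hc]
      simp

theorem tailK_dropTrail (n : Nat) : ∀ (l : List Char), l.length ≤ n →
    dropTrailDash (tailK true l) = List.intercalate ['-'] (kebabWords l) ∧
    dropTrailDash (tailK false l) = wordsCont l := by
  induction n with
  | zero =>
    intro l hl
    have hnil : l = [] := List.eq_nil_of_length_eq_zero (Nat.le_zero.mp hl)
    subst hnil
    simp [tailK, kebabWords, wordsCont, dropTrailDash, List.intercalate]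
  | succ n ih =>
    intro l hl
    cases l with
    | nil => simp [tailK, kebabWords, wordsCont, dropTrailDash, List.intercalate]
    | cons c l =>
      have hl' : l.length ≤ n := by simpa using hl
      by_cases hc : PySem.Chars.isalnum c = true
      · constructor
        · rw [tailK, if_pos hc, dropTrailDash_cons_ne _ _ (lower_ne_dash c hc), (ih l hl').2,
            kebabWords, if_pos hc, intercalate_cons', wordsCont_eq l]
          rcases kebabWords_shape (l.dropWhile PySem.Chars.isalnum) with hw | ⟨a, t, ws, hw⟩
          · simp [hw]
          · simp [hw]
        · rw [tailK, if_pos hc, dropTrailDash_cons_ne _ _ (lower_ne_dash c hc), (ih l hl').2,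
            wordsCont, if_pos hc]
      · constructor
        · rw [tailK, if_neg hc, if_pos rfl, (ih l hl').1, kebabWords, if_neg hc]
        · rw [tailK, if_neg hc, if_neg (by simp), dropTrailDash_cons_dash, (ih l hl').1,
            wordsCont, if_neg hc]
          by_cases hw : kebabWords l = []
          · rw [if_pos ((intercalate_kebabWords_eq_nil_iff l).mpr hw), if_pos hw]
          · rw [if_neg (fun hx => hw ((intercalate_kebabWords_eq_nil_iff l).mp hx)), if_neg hw]

theorem contains_dash_fun : (fun c : Char => ['-'].contains c) = (fun c : Char => c == '-') :=
  funext fun x => by by_cases h : x = '-' <;> simp [h]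

theorem stripChars_dash_eq (xs : List Char)
    (hx : List.dropWhile (fun c : Char => ['-'].contains c) xs = xs) :
    PySem.Chars.stripChars xs ['-'] = dropTrailDash xs := by
  show (List.dropWhile (fun c : Char => ['-'].contains c)
      (List.dropWhile (fun c : Char => ['-'].contains c) xs).reverse).reverse = _
  rw [hx, dropTrailDash, contains_dash_fun]

theorem runE_eq (l : List Char) :
    PySem.Chars.stripChars (runE l) ['-'] = List.intercalate ['-'] (kebabWords l) := by
  induction l with
  | nil => simp [runE, kebabWords, PySem.Chars.stripChars, List.intercalate]
  | cons c l ih =>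
    by_cases hc : PySem.Chars.isalnum c = true
    · have hrun : runE (c :: l) = tailK true (c :: l) := by
        rw [runE, if_pos hc, tailK, if_pos hc]
      have hhead : tailK true (c :: l) = PySem.Chars.lowerChar c :: tailK false l := by
        rw [tailK, if_pos hc]
      have hx : List.dropWhile (fun x : Char => ['-'].contains x) (tailK true (c :: l))
          = tailK true (c :: l) := by
        rw [contains_dash_fun, hhead]
        exact List.dropWhile_cons_of_neg (by simp [lower_ne_dash c hc])
      rw [hrun, stripChars_dash_eq _ hx]
      exact (tailK_dropTrail (c :: l).length (c :: l) le_rfl).1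
    · rw [runE, if_neg hc, kebabWords, if_neg hc]
      exact ih

-- ===== VERDICT (by name: the statement is the Claim_ definition above) =====
theorem suggest_kebab_py_spec : Claim_equal_suggest_kebab_py := by
  intro node_id _
  unfold Spec_suggest_kebab_py suggest_kebab_py suggest_kebab_py_alt
  rw [PySem.Str.stripChars, PySem.Str.join, PySem.Chars.join]
  simp only [String.toList_ofList, List.map_map]
  have hcomp : String.toList ∘ String.ofList = (id : List Char → List Char) :=
    funext fun x => by simp
  rw [hcomp, List.map_id]
  refine congrArg String.ofList ?_
  have hdash : ("-" : String).toList = ['-'] := by decide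
  rw [hdash, foldl_kebabStep_empty]
  exact runE_eq _
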